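-- pv_equiv track=rewrite | github.com/JackSwitzer/AdventofCode | Days/9.py | find_file_bounds
-- ===== SOURCE A (Python) =====
-- def find_file_bounds(blocks, file_id):
--     # Find start and end positions of a file
--     start = -1
--     length = 0
--     for i, block in enumerate(blocks):
--         if block == file_id:
--             if start == -1:
--                 start = i
--             length += 1
--     return start, length
-- ===== SOURCE B (Python) =====
-- def find_file_bounds(blocks, file_id):
--     try:
--         start = blocks.index(file_id)
--     except ValueError:
--         return -1, 0
--     return start, blocks.count(file_id)
-- ===== Notes on version B (the rewrite author's own statement) =====
-- stated objective: idiomatic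
-- what changed: Replaces A's single enumerate loop maintaining (start, length) state with two built-in scans: list.index (with try/except ValueError for the (-1, 0) sentinel) and list.count.
import Mathlib
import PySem

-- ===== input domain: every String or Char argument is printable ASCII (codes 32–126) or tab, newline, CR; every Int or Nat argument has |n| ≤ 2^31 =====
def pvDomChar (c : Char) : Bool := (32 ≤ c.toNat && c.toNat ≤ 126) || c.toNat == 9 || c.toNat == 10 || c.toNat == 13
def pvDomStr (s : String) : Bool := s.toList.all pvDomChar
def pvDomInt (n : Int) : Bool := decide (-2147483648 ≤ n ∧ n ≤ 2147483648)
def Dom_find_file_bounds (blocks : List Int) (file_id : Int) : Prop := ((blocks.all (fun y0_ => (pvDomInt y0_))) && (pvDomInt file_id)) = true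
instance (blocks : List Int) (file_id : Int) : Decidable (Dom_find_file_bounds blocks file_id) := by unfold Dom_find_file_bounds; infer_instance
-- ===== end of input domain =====

-- B replaces A's single state-carrying loop by two built-in scans (index + count); same cost, more idiomatic.

-- ===== PORT A =====
def find_file_bounds (blocks : List Int) (file_id : Int) : Int × Int :=
  (PySem.List.enumerate blocks).foldl
    (fun st p =>
      if p.2 == file_id then
        ((if st.1 == -1 then p.1 else st.1), st.2 + 1)
      else st)
    (-1, 0)

-- ===== PORT B =====
def find_file_bounds_alt (blocks : List Int) (file_id : Int) : Int × Int :=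
  match PySem.List.index? blocks file_id with
  | none => (-1, 0)
  | some start => ((start : Int), (PySem.List.count blocks file_id : Int))

-- ===== PRECONDITION & SPEC =====
def Spec_find_file_bounds (blocks : List Int) (file_id : Int) (out : Int × Int) : Prop := out = find_file_bounds_alt blocks file_id
instance (blocks : List Int) (file_id : Int) (out : Int × Int) : Decidable (Spec_find_file_bounds blocks file_id out) := by unfold Spec_find_file_bounds; infer_instance

-- ===== CLAIM (what is proved, stated in full; the proofs are below) =====
def Claim_equal_find_file_bounds : Prop := ∀ (blocks : List Int) (file_id : Int), Dom_find_file_bounds blocks file_id → Spec_find_file_bounds blocks file_id (find_file_bounds blocks file_id)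

-- ===== LEMMAS AND PROOFS =====

-- After the first match is found (start ≠ -1), the loop only counts remaining matches.
theorem ffb_foldl_found (blocks : List Int) (file_id : Int) (s a c : Int) (ha : a ≠ -1) :
    (PySem.List.enumerate blocks s).foldl
      (fun st p =>
        if p.2 == file_id then
          ((if st.1 == -1 then p.1 else st.1), st.2 + 1)
        else st) (a, c)
    = (a, c + (PySem.List.count blocks file_id : Int)) := by
  induction blocks generalizing s c with
  | nil => simp [PySem.List.enumerate_nil, PySem.List.count]
  | cons x xs ih =>
    rw [PySem.List.enumerate_cons]
    simp only [List.foldl_cons]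
    by_cases hx : x = file_id
    · have hbe : (x == file_id) = true := by simp [hx]
      have hae : (a == -1) = false := by simp [ha]
      simp only [hbe, if_true, hae, Bool.false_eq_true, if_false]
      rw [ih (s + 1) (c + 1)]
      simp [PySem.List.count, hx]
      ring
    · have hbe : (x == file_id) = false := by simp [hx]
      simp only [hbe, Bool.false_eq_true, if_false]
      rw [ih (s + 1) c]
      simp [PySem.List.count, List.count_cons]
      exact hx

-- Before any match (state (-1, c)), the loop result is described by index? and count.
theorem ffb_foldl_main (blocks : List Int) (file_id : Int) (s c : Int) (hs : 0 ≤ s) :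
    (PySem.List.enumerate blocks s).foldl
      (fun st p =>
        if p.2 == file_id then
          ((if st.1 == -1 then p.1 else st.1), st.2 + 1)
        else st) (-1, c)
    = match PySem.List.index? blocks file_id with
      | none => (-1, c)
      | some i => (s + (i : Int), c + (PySem.List.count blocks file_id : Int)) := by
  induction blocks generalizing s c with
  | nil => simp [PySem.List.enumerate_nil, PySem.List.index?_eq_idxOf?]
  | cons x xs ih =>
    rw [PySem.List.enumerate_cons]
    simp only [List.foldl_cons]
    by_cases hx : x = file_id
    · have ha : s ≠ -1 := by omega
      rw [hx, PySem.List.index?_cons_self]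
      simp only [beq_self_eq_true, if_pos]
      rw [ffb_foldl_found xs file_id (s+1) s (c+1) ha]
      simp [PySem.List.count]
      ring
    · rw [PySem.List.index?_cons_of_ne xs hx]
      have hbe : (x == file_id) = false := by simp [hx]
      simp only [hbe, Bool.false_eq_true, if_false]
      rw [ih (s+1) c (by omega)]
      cases h : PySem.List.index? xs file_id with
      | none => simp
      | some i =>
        simp [PySem.List.count, hx]
        omega

-- ===== VERDICT (by name: the statement is the Claim_ definition above) =====
theorem find_file_bounds_spec : Claim_equal_find_file_bounds := by
  intro blocks file_id _
  unfold Spec_find_file_bounds find_file_bounds find_file_bounds_alt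
  rw [ffb_foldl_main blocks file_id 0 0 le_rfl]
  cases h : PySem.List.index? blocks file_id <;> simp [PySem.List.count]
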